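-- pv_equiv track=rewrite | github.com/syrinka/Elegant-Novel-Spider | ens/dumpers/epub.py | content_proc
-- ===== SOURCE A (Python) =====
-- def content_proc(content):
--     lines = content.\
--         replace('&', '&amp;').\
--         replace('<', '&lt;').\
--         replace('>', '&gt;').\
--         replace('"', '&quot;').split('\n')
--
--     return ''.join(
--         '<p>{}</p>'.format(line) for line in lines
--     )
-- ===== SOURCE B (Python) =====
-- _ESC = {'&': '&amp;', '<': '&lt;', '>': '&gt;', '"': '&quot;'}
--
--
-- def content_proc(content):
--     # Single pass over the characters: escape on the fly and emit the
--     # paragraph break '</p><p>' at each newline instead of replace+split.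
--     parts = ['<p>']
--     for ch in content:
--         if ch == '\n':
--             parts.append('</p><p>')
--         else:
--             parts.append(_ESC.get(ch, ch))
--     parts.append('</p>')
--     return ''.join(parts)
-- ===== Notes on version B (the rewrite author's own statement) =====
-- stated objective: alternative
-- what changed: Replaces four sequential full-string replace passes plus a newline split and per-line formatting with a single pass over the characters that escapes each character via a dict and emits the paragraph break at each newline.
import Mathlib
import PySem

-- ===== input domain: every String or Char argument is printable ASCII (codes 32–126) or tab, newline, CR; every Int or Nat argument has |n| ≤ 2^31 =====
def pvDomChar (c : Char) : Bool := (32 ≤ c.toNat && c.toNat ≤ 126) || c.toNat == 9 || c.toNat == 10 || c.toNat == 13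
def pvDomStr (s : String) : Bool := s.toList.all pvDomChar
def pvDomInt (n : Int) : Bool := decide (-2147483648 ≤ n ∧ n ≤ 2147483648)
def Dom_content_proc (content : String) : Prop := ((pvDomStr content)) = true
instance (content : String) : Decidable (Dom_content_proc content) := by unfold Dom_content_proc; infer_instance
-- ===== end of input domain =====

-- B replaces four sequential replace passes plus a newline split and per-line wrapping
-- with one single character pass (dict escape, paragraph break at each newline); alternative, not claimed faster.

-- ===== PORT A =====
-- the newline separator is nonempty, so split? always returns some; getD [] is never the default.
-- '<p>{}</p>'.format(line) is pure concatenation, ported exactly as a join of the three pieces.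
def content_proc (content : String) : String :=
  let lines := (PySem.Str.split?
    (PySem.Str.replace
      (PySem.Str.replace
        (PySem.Str.replace
          (PySem.Str.replace content "&" "&amp;")
          "<" "&lt;")
        ">" "&gt;")
      "\"" "&quot;")
    "\n").getD []
  PySem.Str.join "" (lines.map (fun line => PySem.Str.join "" ["<p>", line, "</p>"]))

-- ===== PORT B =====
def pvEscDict : PySem.Dict Char String :=
  PySem.Dict.mk [('&', "&amp;"), ('<', "&lt;"), ('>', "&gt;"), ('"', "&quot;")]

def content_proc_alt (content : String) : String :=
  let parts := content.toList.foldl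
    (fun parts ch =>
      if ch = '\n' then parts ++ ["</p><p>"]
      else parts ++ [PySem.Dict.getD pvEscDict ch (String.ofList [ch])])
    ["<p>"]
  PySem.Str.join "" (parts ++ ["</p>"])

-- ===== PRECONDITION & SPEC =====
def Spec_content_proc (content : String) (out : String) : Prop := out = content_proc_alt content
instance (content : String) (out : String) : Decidable (Spec_content_proc content out) := by unfold Spec_content_proc; infer_instance

-- ===== CLAIM (what is proved, stated in full; the proofs are below) =====
def Claim_equal_content_proc : Prop := ∀ (content : String), Dom_content_proc content → Spec_content_proc content (content_proc content)

-- ===== LEMMAS AND PROOFS =====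

-- the per-character escape both sides are shown to compute
def pvEsc (c : Char) : List Char :=
  if c = '&' then "&amp;".toList
  else if c = '<' then "&lt;".toList
  else if c = '>' then "&gt;".toList
  else if c = '"' then "&quot;".toList
  else if c = '\n' then "</p><p>".toList
  else [c]

-- single-char replace is a flatMap
theorem replace_go_singleton (a : Char) (new : List Char) :
    ∀ (fuel : Nat) (l acc : List Char), l.length ≤ fuel →
      PySem.Chars.replace.go [a] new fuel l acc =
        acc.reverse ++ l.flatMap (fun c => if c = a then new else [c]) := by
  intro fuel
  induction fuel with
  | zero =>
    intro l acc h
    have : l = [] := List.length_eq_zero_iff.mp (Nat.le_zero.mp h)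
    subst this; simp [PySem.Chars.replace.go]
  | succ n ih =>
    intro l acc h
    cases l with
    | nil => simp [PySem.Chars.replace.go]
    | cons c t =>
      simp only [PySem.Chars.replace.go]
      by_cases hc : c = a
      · subst hc
        have hp : List.isPrefixOf [c] (c :: t) = true := by
          simp [List.isPrefixOf]
        rw [if_pos hp]
        simp only [List.length_cons, List.length_nil, List.drop_succ_cons, List.drop_zero]
        rw [ih t (new.reverse ++ acc) (by simpa using Nat.le_of_succ_le_succ h)]
        simp
      · have hp : List.isPrefixOf [a] (c :: t) = false := by
          simp [List.isPrefixOf]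
          exact fun h' => absurd h'.symm hc
        rw [if_neg (by simp [hp])]
        rw [ih t (c :: acc) (by simpa using Nat.le_of_succ_le_succ h)]
        simp [hc]

theorem replace_singleton (s : List Char) (a : Char) (new : List Char) :
    PySem.Chars.replace s [a] new = s.flatMap (fun c => if c = a then new else [c]) := by
  simp only [PySem.Chars.replace, List.isEmpty]
  rw [replace_go_singleton a new s.length s [] (le_refl _)]
  simp

-- wrapping each piece of a single-char split and flattening is a flatMap
theorem splitOn_go_wrap (a : Char) (p q : List Char) :
    ∀ (fuel : Nat) (l cur : List Char) (acc : List (List Char)), l.length < fuel →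
      ((PySem.Chars.splitOn.go [a] fuel l cur acc).map (fun ln => p ++ ln ++ q)).flatten =
        (acc.reverse.map (fun ln => p ++ ln ++ q)).flatten ++ p ++ cur.reverse ++
          l.flatMap (fun c => if c = a then q ++ p else [c]) ++ q := by
  intro fuel
  induction fuel with
  | zero => intro l cur acc h; omega
  | succ n ih =>
    intro l cur acc h
    cases l with
    | nil => simp [PySem.Chars.splitOn.go]
    | cons c t =>
      simp only [PySem.Chars.splitOn.go]
      by_cases hc : c = a
      · subst hc
        have hp : List.isPrefixOf [c] (c :: t) = true := by simp [List.isPrefixOf]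
        rw [if_pos hp]
        simp only [List.length_cons, List.length_nil, List.drop_succ_cons, List.drop_zero]
        rw [ih t [] (cur.reverse :: acc) (by simpa using Nat.lt_of_succ_lt_succ h)]
        simp
      · have hp : List.isPrefixOf [a] (c :: t) = false := by
          simp [List.isPrefixOf]
          exact fun h' => absurd h'.symm hc
        rw [if_neg (by simp [hp])]
        rw [ih t (c :: cur) acc (by simpa using Nat.lt_of_succ_lt_succ h)]
        simp [hc]

theorem splitOn_wrap (s : List Char) (a : Char) (p q : List Char) :
    ((PySem.Chars.splitOn s [a]).map (fun ln => p ++ ln ++ q)).flatten =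
      p ++ s.flatMap (fun c => if c = a then q ++ p else [c]) ++ q := by
  simp only [PySem.Chars.splitOn]
  rw [splitOn_go_wrap a p q (s.length + 1) s [] [] (by omega)]
  simp

-- joining with the empty separator is flattening
theorem intercalate_nil_sep (xss : List (List Char)) :
    List.intercalate ([] : List Char) xss = xss.flatten := by
  induction xss with
  | nil => simp [List.intercalate]
  | cons x xs ih =>
    cases xs with
    | nil => simp [List.intercalate]
    | cons y ys =>
      simp only [List.intercalate, List.intersperse] at *
      simp_all

-- B's foldl accumulates the mapped tokens
theorem foldl_parts (cs : List Char) (init : List String) :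
    cs.foldl (fun parts ch =>
      if ch = '\n' then parts ++ ["</p><p>"]
      else parts ++ [PySem.Dict.getD pvEscDict ch (String.ofList [ch])]) init =
    init ++ cs.map (fun ch =>
      if ch = '\n' then "</p><p>"
      else PySem.Dict.getD pvEscDict ch (String.ofList [ch])) := by
  induction cs generalizing init with
  | nil => simp
  | cons c t ih =>
    simp only [List.foldl_cons, List.map_cons]
    by_cases hc : c = '\n' <;> simp [hc, ih]

-- B's per-character token agrees with pvEsc
theorem tok_eq_esc (c : Char) :
    (if c = '\n' then "</p><p>"
     else PySem.Dict.getD pvEscDict c (String.ofList [c])).toList = pvEsc c := by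
  by_cases h1 : c = '&'; · subst h1; decide
  by_cases h2 : c = '<'; · subst h2; decide
  by_cases h3 : c = '>'; · subst h3; decide
  by_cases h4 : c = '"'; · subst h4; decide
  by_cases h5 : c = '\n'; · subst h5; decide
  have e1 : ('&' == c) = false := beq_eq_false_iff_ne.mpr (fun h => h1 h.symm)
  have e2 : ('<' == c) = false := beq_eq_false_iff_ne.mpr (fun h => h2 h.symm)
  have e3 : ('>' == c) = false := beq_eq_false_iff_ne.mpr (fun h => h3 h.symm)
  have e4 : ('"' == c) = false := beq_eq_false_iff_ne.mpr (fun h => h4 h.symm)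
  simp [pvEsc, h1, h2, h3, h4, h5, PySem.Dict.getD, PySem.Dict.get?, pvEscDict,
    List.find?, e1, e2, e3, e4]

-- A's composed escapes + newline substitution agree with pvEsc, per character
theorem a_esc_eq (c : Char) :
    (if c = '&' then "&amp;".toList else [c]).flatMap
      (fun d => (if d = '<' then "&lt;".toList else [d]).flatMap
        (fun e => (if e = '>' then "&gt;".toList else [e]).flatMap
          (fun f => (if f = '"' then "&quot;".toList else [f]).flatMap
            (fun g => if g = '\n' then "</p>".toList ++ "<p>".toList else [g])))) = pvEsc c := by
  by_cases h1 : c = '&'; · subst h1; decide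
  by_cases h2 : c = '<'; · subst h2; decide
  by_cases h3 : c = '>'; · subst h3; decide
  by_cases h4 : c = '"'; · subst h4; decide
  by_cases h5 : c = '\n'; · subst h5; decide
  simp [pvEsc, h1, h2, h3, h4, h5]

theorem wrap_toList (s : String) :
    (PySem.Str.join "" ["<p>", s, "</p>"]).toList = "<p>".toList ++ s.toList ++ "</p>".toList := by
  rw [PySem.Str.toList_join]
  simp [PySem.Chars.join, intercalate_nil_sep]

theorem content_proc_spec' (content : String) :
    content_proc content = content_proc_alt content := by
  apply String.toList_inj.mp
  simp only [content_proc, content_proc_alt]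
  rw [foldl_parts, PySem.Str.toList_join, PySem.Str.toList_join]
  simp only [PySem.Str.split?, PySem.Chars.split?, PySem.Str.toList_replace]
  rw [if_neg (by decide)]
  simp only [Option.map_some, Option.getD_some, PySem.Chars.join,
    List.map_map, List.map_append, List.map_cons, List.map_nil]
  simp only [Function.comp_def, wrap_toList, tok_eq_esc, String.toList_ofList]
  have h0 : "".toList = ([] : List Char) := by decide
  have hsep : "\n".toList = ['\n'] := by decide
  have hq : "\"".toList = ['"'] := by decide
  have hgt : ">".toList = ['>'] := by decide
  have hlt : "<".toList = ['<'] := by decide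
  have hamp : "&".toList = ['&'] := by decide
  simp only [h0, hsep, hq, hgt, hlt, hamp, intercalate_nil_sep]
  rw [replace_singleton, replace_singleton, replace_singleton, replace_singleton, splitOn_wrap]
  simp only [List.flatMap_assoc, a_esc_eq]
  simp [List.flatMap_def]

-- ===== VERDICT (by name: the statement is the Claim_ definition above) =====
theorem content_proc_spec : Claim_equal_content_proc := by
  intro content _
  exact content_proc_spec' content
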